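-- pv_equiv track=rewrite | github.com/calderast/DA_maze | Steph/turnaround_functions.py | count_entries_for_each_dead_end
-- ===== SOURCE A (Python) =====
-- def count_entries_for_each_dead_end(dead_end_paths, list_of_entries):
--     """ Count the number of times the rat entered a specific dead end
--
--     Args:
--     dead_end_paths (list): A list representing the areas a person entered
--     list_of_entries (list): A list representing distinct instances of area entry
--
--     Returns:
--     result: A list of counts, where each count represents how many times the rat entered a specific dead end
--     dead_end_counts: A dictionary representing the number of times the rat entered the path to each dead end
--     """
--
--     result = []
--     dead_end_counts = {}
--     distinct_entries = set()
--
--     # replace each dead end path with just the dead end hex to make things easier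
--     dead_ends = [sublist[0] for sublist in dead_end_paths]
--
--     for de, entry in zip(dead_ends, list_of_entries):
--         # if this is a new entry into a dead end, start or add to the entry count for this dead end
--         if entry not in distinct_entries:
--             if de not in dead_end_counts:
--                 dead_end_counts[de] = 1
--             else:
--                 dead_end_counts[de] += 1
--             # add this to our set of distinct entries so we don't double count it
--             distinct_entries.add(entry)
--
--         result.append(dead_end_counts[de])
--
--     return result, dead_end_counts
-- ===== SOURCE B (Python) =====
-- def count_entries_for_each_dead_end(dead_end_paths, list_of_entries):
--     """Stateless re-implementation: no running set/dict threaded through one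
--     fused loop.  Each result[i] is an independent prefix-count query (number of
--     first-occurrence steps j <= i entering the same dead end), and the count
--     dictionary is rebuilt afterwards from the final per-position counts."""
--     dead_ends = [sublist[0] for sublist in dead_end_paths]
--     n = min(len(dead_ends), len(list_of_entries))
--     result = [sum(1 for j in range(i + 1)
--                   if list_of_entries[j] not in list_of_entries[:j]
--                   and dead_ends[j] == dead_ends[i])
--               for i in range(n)]
--     # key position = first occurrence of the dead end, value = last (= total) count
--     dead_end_counts = {de: c for de, c in zip(dead_ends, result)}
--     return result, dead_end_counts
-- ===== Notes on version B (the rewrite author's own statement) =====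
-- stated objective: alternative
-- what changed: Replaces A's stateful fused loop (a running distinct-entries set and an incrementally updated counts dict, with the dict read back each step) by a stateless prefix-count formulation: each result[i] is an independent count of first-occurrence steps j <= i that enter the same dead end, and the dictionary is rebuilt afterwards by one comprehension over the final per-position counts.
import Mathlib
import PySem

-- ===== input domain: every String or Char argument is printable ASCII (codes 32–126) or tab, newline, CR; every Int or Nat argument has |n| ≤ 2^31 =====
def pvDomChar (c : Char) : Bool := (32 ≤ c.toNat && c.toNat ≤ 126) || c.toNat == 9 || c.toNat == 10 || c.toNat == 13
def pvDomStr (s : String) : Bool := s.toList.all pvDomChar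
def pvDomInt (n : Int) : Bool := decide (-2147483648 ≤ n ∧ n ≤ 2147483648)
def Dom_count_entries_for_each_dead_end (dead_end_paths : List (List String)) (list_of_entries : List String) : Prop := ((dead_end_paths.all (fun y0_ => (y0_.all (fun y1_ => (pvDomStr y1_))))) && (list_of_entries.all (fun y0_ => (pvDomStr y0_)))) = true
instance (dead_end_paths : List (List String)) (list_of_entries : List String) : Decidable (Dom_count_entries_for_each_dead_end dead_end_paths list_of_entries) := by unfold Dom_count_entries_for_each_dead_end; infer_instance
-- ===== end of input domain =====

-- B replaces A's fused stateful loop (running distinct-entries set + incrementally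
-- updated counts dict) by stateless prefix-count queries, the dict rebuilt afterwards
-- (objective: alternative algorithm; B is quadratic, not faster).


-- ===== PORT A =====
-- 'sublist[0]' raises IndexError on an empty sublist and 'dead_end_counts[de]' raises
-- KeyError when de is absent; both are excluded by Pre_ below, the total forms use defaults.
def count_entries_for_each_dead_end (dead_end_paths : List (List String)) (list_of_entries : List String) : List Int × (List (String × Int)) :=
  let dead_ends : List String := dead_end_paths.map (fun sublist => (PySem.List.pyGet? sublist 0).getD "")
  let fin := (dead_ends.zip list_of_entries).foldl
    (fun (st : List Int × PySem.Dict String Int × PySem.Set String) de_entry =>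
      let cd :=
        if st.2.2.contains de_entry.2 = false then
          (if st.2.1.contains de_entry.1 = false then st.2.1.insert de_entry.1 1
           else st.2.1.modify de_entry.1 0 (· + 1),
           st.2.2.add de_entry.2)
        else (st.2.1, st.2.2)
      (st.1 ++ [cd.1.getD de_entry.1 0], cd))
    ([], PySem.Dict.empty, PySem.Set.empty)
  (fin.1, fin.2.1.items)

-- ===== PORT B =====
-- 'sublist[0]' raises like A's (excluded by Pre_, total form getD ""); the range
-- indices are always in bounds, so the pyGetD defaults are never taken.
def count_entries_for_each_dead_end_alt (dead_end_paths : List (List String)) (list_of_entries : List String) : List Int × (List (String × Int)) :=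
  let dead_ends : List String := dead_end_paths.map (fun sublist => (PySem.List.pyGet? sublist 0).getD "")
  let n : Int := min (PySem.List.len dead_ends) (PySem.List.len list_of_entries)
  let result : List Int := (PySem.List.pyRange 0 n 1).map (fun i =>
    (PySem.List.pyRange 0 (i + 1) 1).foldl (fun acc j =>
      if !(decide (PySem.List.pyGetD list_of_entries j "" ∈ PySem.List.slice list_of_entries none (some j))) &&
         (PySem.List.pyGetD dead_ends j "" == PySem.List.pyGetD dead_ends i "") then acc + 1 else acc) 0)
  let dead_end_counts : PySem.Dict String Int :=
    (dead_ends.zip result).foldl (fun d p => d.insert p.1 p.2) PySem.Dict.empty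
  (result, dead_end_counts.items)

-- ===== PRECONDITION & SPEC =====
-- Pre_ excludes exactly the inputs where the Python A raises: an empty sublist in
-- dead_end_paths (IndexError in the comprehension), and a step whose entry was already
-- seen while its dead end was never counted before (KeyError on dead_end_counts[de]).
def Pre_count_entries_for_each_dead_end (dead_end_paths : List (List String)) (list_of_entries : List String) : Prop :=
  (∀ p ∈ dead_end_paths, p ≠ []) ∧
  (∀ i, i < min dead_end_paths.length list_of_entries.length →
    list_of_entries.getD i "" ∈ list_of_entries.take i →
    ∃ j, j < i ∧ list_of_entries.getD j "" ∉ list_of_entries.take j ∧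
      (dead_end_paths.getD j []).headD "" = (dead_end_paths.getD i []).headD "")
instance (dead_end_paths : List (List String)) (list_of_entries : List String) : Decidable (Pre_count_entries_for_each_dead_end dead_end_paths list_of_entries) := by unfold Pre_count_entries_for_each_dead_end; infer_instance

def pvWitness_count_entries_for_each_dead_end : List (List String) × List String :=
  ([["a", "b"], ["c"], ["a"]], ["x", "y", "x"])

def Spec_count_entries_for_each_dead_end (dead_end_paths : List (List String)) (list_of_entries : List String) (out : List Int × (List (String × Int))) : Prop := out = count_entries_for_each_dead_end_alt dead_end_paths list_of_entries
instance (dead_end_paths : List (List String)) (list_of_entries : List String) (out : List Int × (List (String × Int))) : Decidable (Spec_count_entries_for_each_dead_end dead_end_paths list_of_entries out) := by unfold Spec_count_entries_for_each_dead_end; infer_instance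

-- ===== CLAIM (what is proved, stated in full; the proofs are below) =====
def Claim_equal_count_entries_for_each_dead_end : Prop := ∀ (dead_end_paths : List (List String)) (list_of_entries : List String), Dom_count_entries_for_each_dead_end dead_end_paths list_of_entries → Pre_count_entries_for_each_dead_end dead_end_paths list_of_entries → Spec_count_entries_for_each_dead_end dead_end_paths list_of_entries (count_entries_for_each_dead_end dead_end_paths list_of_entries)

-- ===== LEMMAS AND PROOFS =====

-- step j is counted iff entry j is the first occurrence of its value
def pvFirst (loe : List String) (j : Nat) : Bool := !(decide (loe.getD j "" ∈ loe.take j))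

-- number of counted steps j < k entering dead end x (B's prefix-count query)
def pvCnt (des loe : List String) (x : String) (k : Nat) : Int :=
  ((List.range k).countP (fun j => pvFirst loe j && (des.getD j "" == x)) : Int)

-- B's value at position j
def pvBval (des loe : List String) (j : Nat) : Int := pvCnt des loe (des.getD j "") (j + 1)

-- the dict built by inserting (dead end, B-value) for every step j < k
def pvE (des loe : List String) (k : Nat) : PySem.Dict String Int :=
  ((List.range k).map (fun j => (des.getD j "", pvBval des loe j))).foldl
    (fun d p => d.insert p.1 p.2) PySem.Dict.empty

theorem pvE_succ (des loe : List String) (k : Nat) :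
    pvE des loe (k + 1) = (pvE des loe k).insert (des.getD k "") (pvBval des loe k) := by
  simp [pvE, List.range_succ]

theorem pvCnt_succ (des loe : List String) (x : String) (k : Nat) :
    pvCnt des loe x (k + 1) =
      pvCnt des loe x k + (if pvFirst loe k && (des.getD k "" == x) then 1 else 0) := by
  unfold pvCnt
  rw [List.range_succ, List.countP_append]
  simp only [List.countP_cons, List.countP_nil]
  split <;> simp

theorem pvE_get? (des loe : List String) (x : String) (k : Nat) :
    (pvE des loe k).get? x =
      if (List.range k).any (fun j => des.getD j "" == x) then some (pvCnt des loe x k) else none := by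
  induction k with
  | zero => simp [pvE]
  | succ k ih =>
    rw [pvE_succ]
    by_cases hx : x = des.getD k ""
    · subst hx
      rw [PySem.Dict.get?_insert_self]
      have hany : ((List.range (k + 1)).any fun j => des.getD j "" == des.getD k "") = true := by
        rw [List.any_eq_true]
        exact ⟨k, by simp, by simp⟩
      rw [if_pos hany]
      rfl
    · rw [PySem.Dict.get?_insert_of_ne _ _ hx, ih, pvCnt_succ]
      have hb : (des.getD k "" == x) = false := beq_eq_false_iff_ne.mpr (fun h => hx h.symm)
      have hstep : ((List.range (k + 1)).any fun j => des.getD j "" == x) =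
          ((List.range k).any fun j => des.getD j "" == x) := by
        rw [List.range_succ, List.any_append]
        simp only [List.any_cons, List.any_nil, hb, Bool.or_false]
      rw [hstep, hb]
      simp

theorem pvCnt_eq_zero (des loe : List String) (x : String) (k : Nat)
    (h : (List.range k).any (fun j => des.getD j "" == x) = false) :
    pvCnt des loe x k = 0 := by
  unfold pvCnt
  have hz : (List.range k).countP (fun j => pvFirst loe j && (des.getD j "" == x)) = 0 := by
    rw [List.countP_eq_zero]
    intro j hj
    have hja := List.any_eq_false.mp h j hj
    simp only [Bool.and_eq_true, not_and]
    exact fun _ hb => hja hb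
  rw [hz]
  rfl

theorem pvE_getD (des loe : List String) (x : String) (k : Nat) :
    (pvE des loe k).getD x 0 = pvCnt des loe x k := by
  rw [PySem.Dict.getD_eq_get?_getD, pvE_get?]
  cases hany : ((List.range k).any fun j => des.getD j "" == x)
  · rw [pvCnt_eq_zero des loe x k hany, if_neg (by simp)]
    rfl
  · rw [if_pos rfl]
    rfl

theorem pvE_nodup (des loe : List String) (k : Nat) : (pvE des loe k).keys.Nodup := by
  exact PySem.Dict.nodup_keys_foldl_insert_key _ Prod.fst (fun _ p => p.2) PySem.Dict.empty
    PySem.Dict.nodup_keys_empty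

theorem pv_insert_same (d : PySem.Dict String Int) (k : String) (v : Int)
    (hnd : d.keys.Nodup) (h : d.get? k = some v) : d.insert k v = d := by
  apply PySem.Dict.ext
  have hc : d.contains k := by rw [PySem.Dict.contains_eq_isSome_get?, h]; rfl
  rw [PySem.Dict.items_insert_of_contains _ _ hc]
  conv_rhs => rw [← List.map_id d.items]
  apply List.map_congr_left
  intro p hp
  by_cases hpk : p.1 = k
  · have hgv : d.get? p.1 = some p.2 := PySem.Dict.get?_of_mem_items d hp hnd
    rw [hpk, h] at hgv
    have hv : v = p.2 := by injection hgv
    rw [if_pos (by simp [hpk]), ← hpk, hv]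
    simp
  · rw [if_neg (by simp [hpk])]
    rfl

theorem pv_modify_eq_insert (d : PySem.Dict String Int) (k : String) :
    d.modify k 0 (· + 1) = d.insert k (d.getD k 0 + 1) := by
  simp [PySem.Dict.modify, PySem.Dict.insert, PySem.Dict.getD]

-- the A-loop invariant: after k steps A holds B's prefix of results, the dict pvE k,
-- and the set of already-seen entries
theorem pv_main (des loe : List String)
    (H : ∀ i, i < min des.length loe.length → loe.getD i "" ∈ loe.take i →
      ∃ j, j < i ∧ pvFirst loe j = true ∧ des.getD j "" = des.getD i "") :
    ∀ k, k ≤ min des.length loe.length →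
    ((des.zip loe).take k).foldl
      (fun (st : List Int × PySem.Dict String Int × PySem.Set String) de_entry =>
        let cd :=
          if st.2.2.contains de_entry.2 = false then
            (if st.2.1.contains de_entry.1 = false then st.2.1.insert de_entry.1 1
             else st.2.1.modify de_entry.1 0 (· + 1),
             st.2.2.add de_entry.2)
          else (st.2.1, st.2.2)
        (st.1 ++ [cd.1.getD de_entry.1 0], cd))
      ([], PySem.Dict.empty, PySem.Set.empty) =
    ((List.range k).map (pvBval des loe), pvE des loe k, PySem.Set.ofList (loe.take k)) := by
  intro k
  induction k with
  | zero =>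
    intro _
    simp [pvE]
  | succ k ih =>
    intro hk1
    have hk : k < min des.length loe.length := by omega
    have hkd : k < des.length := by omega
    have hkl : k < loe.length := by omega
    have hzs : (des.zip loe).take (k + 1) = (des.zip loe).take k ++ [(des[k], loe[k])] := by
      rw [List.take_add_one]
      have : (des.zip loe)[k]? = some (des[k], loe[k]) := by
        rw [List.getElem?_eq_getElem (by simp [List.length_zip]; omega)]
        simp [List.getElem_zip]
      simp [this]
    rw [hzs, List.foldl_append, ih (by omega)]
    simp only [List.foldl_cons, List.foldl_nil]
    have hdk : des.getD k "" = des[k] := List.getD_eq_getElem des "" hkd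
    have hlk : loe.getD k "" = loe[k] := List.getD_eq_getElem loe "" hkl
    have hloe : loe.take (k + 1) = loe.take k ++ [loe[k]] := by
      rw [List.take_add_one, List.getElem?_eq_getElem hkl]; rfl
    by_cases hmem : loe[k] ∈ loe.take k
    · -- entry already seen: A leaves everything but the result unchanged
      have hcont : (PySem.Set.ofList (loe.take k)).contains loe[k] = true := by
        rw [PySem.Set.contains_iff, PySem.Set.mem_ofList]; exact hmem
      have hfirst : pvFirst loe k = false := by
        unfold pvFirst
        rw [hlk]
        simp [hmem]
      obtain ⟨j, hji, hfj, hde⟩ := H k hk (by rwa [hlk])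
      have hany : (List.range k).any (fun j => des.getD j "" == des[k]) = true := by
        rw [List.any_eq_true]
        refine ⟨j, List.mem_range.mpr hji, ?_⟩
        rw [hde, hdk]
        exact beq_self_eq_true _
      have hbval : pvBval des loe k = pvCnt des loe des[k] k := by
        unfold pvBval
        rw [pvCnt_succ, hdk, hfirst]
        simp
      have hget : (pvE des loe k).get? des[k] = some (pvBval des loe k) := by
        rw [pvE_get?, if_pos hany, hbval]
      have hEsucc : pvE des loe (k + 1) = pvE des loe k := by
        rw [pvE_succ, hdk]
        exact pv_insert_same _ _ _ (pvE_nodup des loe k) hget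
      simp only [hcont, Bool.true_eq_false, if_false]
      rw [List.range_succ, List.map_append, hloe, PySem.Set.ofList_append_singleton,
        PySem.Set.add_of_mem ((PySem.Set.mem_ofList _ _).mpr hmem), hEsucc,
        PySem.Dict.getD_eq_get?_getD, hget]
      rfl
    · -- first occurrence: A counts, matching pvE (k+1)
      have hcont : (PySem.Set.ofList (loe.take k)).contains loe[k] = false := by
        rw [Bool.eq_false_iff]
        intro h
        rw [PySem.Set.contains_iff, PySem.Set.mem_ofList] at h
        exact hmem h
      have hfirst : pvFirst loe k = true := by
        unfold pvFirst
        rw [hlk]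
        simp [hmem]
      have hdict : (if (pvE des loe k).contains des[k] = false
            then (pvE des loe k).insert des[k] 1
            else (pvE des loe k).modify des[k] 0 (· + 1)) =
          (pvE des loe k).insert des[k] ((pvE des loe k).getD des[k] 0 + 1) := by
        by_cases hc : (pvE des loe k).contains des[k] = false
        · rw [if_pos hc, PySem.Dict.getD_of_not_contains _ _ hc]
          simp
        · rw [if_neg hc, pv_modify_eq_insert]
      have hbval : pvBval des loe k = (pvE des loe k).getD des[k] 0 + 1 := by
        unfold pvBval
        rw [pvCnt_succ, hdk, hfirst, pvE_getD]
        simp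
      have hEsucc : pvE des loe (k + 1) =
          (pvE des loe k).insert des[k] ((pvE des loe k).getD des[k] 0 + 1) := by
        rw [pvE_succ, hdk, hbval]
      simp only [hcont, if_true]
      rw [hdict, List.range_succ, List.map_append, hloe, PySem.Set.ofList_append_singleton,
        hEsucc, PySem.Dict.getD_insert_self, ← hbval]
      rfl

theorem pv_des_get (dps : List (List String)) (j : Nat) (h : j < dps.length) :
    (dps.map (fun sublist => (PySem.List.pyGet? sublist 0).getD "")).getD j "" =
      (dps.getD j []).headD "" := by
  rw [List.getD_eq_getElem _ _ (by simpa using h), List.getElem_map,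
    List.getD_eq_getElem _ _ h]
  rw [PySem.List.pyGet?_zero]
  cases dps[j] <;> simp

theorem pv_zip_map (des : List String) (g : Nat → Int) (m : Nat) (h : m ≤ des.length) :
    des.zip ((List.range m).map g) = (List.range m).map (fun j => (des.getD j "", g j)) := by
  apply List.ext_getElem
  · simp [List.length_zip]; omega
  · intro i h1 h2
    simp only [List.length_zip, List.length_map, List.length_range] at h1
    rw [List.getElem_zip, List.getElem_map, List.getElem_map, List.getElem_range]
    congr 1
    exact (List.getD_eq_getElem des "" (by omega)).symm

theorem pv_alt_eq (dps : List (List String)) (loe : List String) :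
    count_entries_for_each_dead_end_alt dps loe =
      ((List.range (min (dps.map (fun sublist => (PySem.List.pyGet? sublist 0).getD "")).length loe.length)).map
        (pvBval (dps.map (fun sublist => (PySem.List.pyGet? sublist 0).getD "")) loe),
       (pvE (dps.map (fun sublist => (PySem.List.pyGet? sublist 0).getD "")) loe
        (min (dps.map (fun sublist => (PySem.List.pyGet? sublist 0).getD "")).length loe.length)).items) := by
  unfold count_entries_for_each_dead_end_alt
  dsimp only
  set des := dps.map (fun sublist => (PySem.List.pyGet? sublist 0).getD "") with hdes
  set m := min des.length loe.length with hm
  have hn : min (PySem.List.len des) (PySem.List.len loe) = (m : Int) := by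
    simp [PySem.List.len_eq, hm]
  rw [hn]
  have hrange : PySem.List.pyRange 0 (m : Int) 1 = (List.range m).map (fun k : Nat => (k : Int)) := by
    rw [PySem.List.pyRange_one]
    simp only [sub_zero, Int.toNat_natCast]
    exact List.map_congr_left (fun a _ => by simp)
  rw [hrange, List.map_map]
  have hres : ∀ k : Nat,
      ((PySem.List.pyRange 0 ((k : Int) + 1) 1).foldl (fun acc j =>
        if !(decide (PySem.List.pyGetD loe j "" ∈ PySem.List.slice loe none (some j))) &&
           (PySem.List.pyGetD des j "" == PySem.List.pyGetD des (k : Int) "") then acc + 1 else acc) 0)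
        = pvBval des loe k := by
    intro k
    rw [PySem.List.foldl_if_add_one]
    have h1 : ((k : Int) + 1) = (((k + 1 : Nat)) : Int) := by push_cast; ring
    rw [h1, PySem.List.pyRange_one]
    simp only [sub_zero, Int.toNat_natCast, zero_add, List.countP_map]
    unfold pvBval pvCnt
    congr 1
    apply List.countP_congr
    intro j hj
    simp [pvFirst, PySem.List.slice_to_natCast]
  have hmaps : (List.range m).map ((fun i : Int =>
      (PySem.List.pyRange 0 (i + 1) 1).foldl (fun acc j =>
        if !(decide (PySem.List.pyGetD loe j "" ∈ PySem.List.slice loe none (some j))) &&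
           (PySem.List.pyGetD des j "" == PySem.List.pyGetD des i "") then acc + 1 else acc) 0)
        ∘ (fun k : Nat => (k : Int)))
      = (List.range m).map (pvBval des loe) := by
    apply List.map_congr_left
    intro k _
    exact hres k
  rw [hmaps, pv_zip_map des (pvBval des loe) m (by omega), pvE]

-- ===== VERDICT (by name: the statement is the Claim_ definition above) =====
theorem count_entries_for_each_dead_end_spec : Claim_equal_count_entries_for_each_dead_end := by
  intro dps loe _ hpre
  unfold Spec_count_entries_for_each_dead_end
  rw [pv_alt_eq]
  unfold count_entries_for_each_dead_end
  dsimp only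
  set des := dps.map (fun sublist => (PySem.List.pyGet? sublist 0).getD "") with hdes
  set m := min des.length loe.length with hm
  have hdl : des.length = dps.length := by simp [hdes]
  have H : ∀ i, i < min des.length loe.length → loe.getD i "" ∈ loe.take i →
      ∃ j, j < i ∧ pvFirst loe j = true ∧ des.getD j "" = des.getD i "" := by
    intro i hi hmem
    obtain ⟨j, hji, hnf, hde⟩ := hpre.2 i (by omega) hmem
    have hfj : pvFirst loe j = true := by
      unfold pvFirst
      rw [decide_eq_false hnf]
      rfl
    refine ⟨j, hji, hfj, ?_⟩
    rw [pv_des_get dps j (by omega), pv_des_get dps i (by omega)]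
    exact hde
  have hfull : (des.zip loe) = (des.zip loe).take m := by
    have hlen : (des.zip loe).length = m := by simp [List.length_zip, hm]
    rw [← hlen, List.take_length]
  rw [hfull, pv_main des loe H m (le_refl m)]
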